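-- pv_equiv track=rewrite | github.com/karimmerchaoui/Real-Property-Records-Scraper | src/formatting.py | format_house_feature
-- ===== SOURCE A (Python) =====
-- def format_house_feature(input_string, features):
--     # Split the input string into lines
--     lines = input_string.strip().split('\n')
--
--     # Initialize an empty dictionary to hold the results
--     result_dict = {}
--
--     # Iterate through the list of words
--     for word in features:
--         # Iterate through the lines to find the word
--         for i in range(len(lines) - 1):  # Ensure we don't go out of bounds
--             if word in lines[i]:
--                 result_dict[word] = lines[i + 1].strip()  # Store the next line as value
--                 break  # Stop searching after finding the first occurrence
--
--     return result_dict
-- ===== SOURCE B (Python) =====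
-- def format_house_feature(input_string, features):
--     # Locate each feature with one str.find over the whole stripped text and
--     # recover its line number by counting the newlines before the match,
--     # instead of scanning the line list per feature.  With fewer than two
--     # lines there is no "next line" for any feature, so the result is empty;
--     # a feature containing '\n' can never occur inside a single line.
--     s = input_string.strip()
--     lines = s.split('\n')
--     if len(lines) < 2:
--         return {}
--     result = {}
--     for w in features:
--         if '\n' in w:
--             continue
--         p = s.find(w)
--         if p < 0:
--             continue
--         i = s[:p].count('\n')
--         if i < len(lines) - 1:
--             result[w] = lines[i + 1].strip()
--     return result
-- ===== Notes on version B (the rewrite author's own statement) =====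
-- stated objective: faster
-- what changed: B never scans the line list: it returns {} outright when there is no second line, and otherwise locates each feature by one C-level substring search (str.find) on the whole stripped text, recovers its line index by counting the newlines before the match position, and looks up the following line directly.
import Mathlib
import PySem

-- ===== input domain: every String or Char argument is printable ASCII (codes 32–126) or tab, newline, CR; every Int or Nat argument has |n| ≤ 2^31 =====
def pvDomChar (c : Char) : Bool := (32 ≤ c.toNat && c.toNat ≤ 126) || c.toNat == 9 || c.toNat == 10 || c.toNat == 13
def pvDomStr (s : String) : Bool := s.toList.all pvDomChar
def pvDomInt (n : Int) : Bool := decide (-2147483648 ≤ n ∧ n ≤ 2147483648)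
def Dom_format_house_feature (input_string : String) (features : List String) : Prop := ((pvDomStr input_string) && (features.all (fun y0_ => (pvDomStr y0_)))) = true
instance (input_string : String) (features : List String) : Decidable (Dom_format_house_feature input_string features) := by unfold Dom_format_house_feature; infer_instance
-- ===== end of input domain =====

-- B replaces A's per-feature scan of the line list by one substring search (str.find) on the
-- whole stripped text plus a newline count before the match position, returning {} outright
-- when there is no second line (objective: faster, measured).

-- ===== PORT A =====
-- inner 'for i in range(len(lines)-1): if word in lines[i]: … break' as structural recursion on the line list
def fhfFindA (word : String) : List String → Option String
  | a :: b :: rest =>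
      if PySem.Str.isIn word a then some (PySem.Str.strip b)
      else fhfFindA word (b :: rest)
  | _ => none

def format_house_feature (input_string : String) (features : List String) : List (String × String) :=
  let lines := (PySem.Str.split? (PySem.Str.strip input_string) "\n").getD []
  (features.foldl (fun d w =>
      match fhfFindA w lines with
      | some v => d.insert w v
      | none => d) PySem.Dict.empty).items

-- ===== PORT B =====
def format_house_feature_alt (input_string : String) (features : List String) : List (String × String) :=
  let s := PySem.Str.strip input_string
  let lines := (PySem.Str.split? s "\n").getD []
  if lines.length < 2 then []               -- 'if len(lines) < 2: return {}'
  else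
  (features.foldl (fun d w =>
      if PySem.Str.isIn "\n" w then d          -- 'if '\n' in w: continue'
      else
        let p := PySem.Str.find s w            -- 'p = s.find(w)'
        if p < 0 then d                        -- 'if p < 0: continue'
        else
          let i := PySem.Str.count (PySem.Str.slice s none (some p)) "\n"   -- 'i = s[:p].count('\n')'
          if (i : Int) < (lines.length : Int) - 1 then
            d.insert w (PySem.Str.strip ((PySem.List.pyGet? lines ((i : Int) + 1)).getD ""))
          else d) PySem.Dict.empty).items

-- ===== PRECONDITION & SPEC =====
def Spec_format_house_feature (input_string : String) (features : List String) (out : List (String × String)) : Prop := out = format_house_feature_alt input_string features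
instance (input_string : String) (features : List String) (out : List (String × String)) : Decidable (Spec_format_house_feature input_string features out) := by unfold Spec_format_house_feature; infer_instance

-- ===== CLAIM (what is proved, stated in full; the proofs are below) =====
def Claim_equal_format_house_feature : Prop := ∀ (input_string : String) (features : List String), Dom_format_house_feature input_string features → Spec_format_house_feature input_string features (format_house_feature input_string features)

-- ===== LEMMAS AND PROOFS =====

-- structural version of s.split('\n')
def splitNL : List Char → List (List Char)
  | [] => [[]]
  | c :: r => if c = '\n' then [] :: splitNL r else (splitNL r).modifyHead (c :: ·)

-- Chars-level copy of A's inner search, used only by the proof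
def findAC (w : List Char) : List (List Char) → Option (List Char)
  | a :: b :: rest =>
      if PySem.Chars.isIn w a then some (PySem.Chars.strip b)
      else findAC w (b :: rest)
  | _ => none

-- Chars-level value of B's per-feature branch, used only by the proof
def bOptC (t w : List Char) : Option (List Char) :=
  if PySem.Chars.isIn ['\n'] w then none
  else if PySem.Chars.find t w < 0 then none
  else
    let i := (t.take (PySem.Chars.find t w).toNat).count '\n'
    if (i : Int) < ((splitNL t).length : Int) - 1 then
      some (PySem.Chars.strip ((splitNL t).getD (i + 1) []))
    else none

theorem infix_of_prefix_drop (w s : List Char) (p : Nat) (h : w <+: s.drop p) : w <:+: s :=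
  h.isInfix.trans (s.drop_suffix p).isInfix

theorem splitNL_ne_nil (s : List Char) : splitNL s ≠ [] := by
  induction s with
  | nil => simp [splitNL]
  | cons c r ih =>
    simp only [splitNL]
    split
    · simp
    · cases h : splitNL r with
      | nil => exact absurd h ih
      | cons a t => simp

theorem splitNL_no_nl (s : List Char) (h : '\n' ∉ s) : splitNL s = [s] := by
  induction s with
  | nil => rfl
  | cons c r ih =>
    simp only [List.mem_cons, not_or] at h
    simp [splitNL, Ne.symm h.1, ih h.2]

theorem splitNL_append (a r : List Char) (h : '\n' ∉ a) :
    splitNL (a ++ '\n' :: r) = a :: splitNL r := by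
  induction a with
  | nil => simp [splitNL]
  | cons c a' ih =>
    simp only [List.mem_cons, not_or] at h
    simp [splitNL, Ne.symm h.1, ih h.2]

theorem splitNL_mem_no_nl (s : List Char) : ∀ l ∈ splitNL s, '\n' ∉ l := by
  induction s with
  | nil => simp [splitNL]
  | cons c r ih =>
    simp only [splitNL]
    split
    · intro l hl
      rcases List.mem_cons.1 hl with h | h
      · simp [h]
      · exact ih l h
    · rename_i hc
      cases h : splitNL r with
      | nil => exact absurd h (splitNL_ne_nil r)
      | cons a t =>
        intro l hl
        rcases List.mem_cons.1 (by simpa [h] using hl) with h' | h'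
        · subst h'
          have ha : '\n' ∉ a := ih a (by simp [h])
          simp only [List.mem_cons, not_or]
          exact ⟨Ne.symm hc, ha⟩
        · exact ih l (by simp [h, h'])

theorem splitOn_go_eq (fuel : Nat) (l cur : List Char) (acc : List (List Char)) (hf : l.length < fuel) :
    PySem.Chars.splitOn.go ['\n'] fuel l cur acc =
      acc.reverse ++ (splitNL l).modifyHead (cur.reverse ++ ·) := by
  induction fuel generalizing l cur acc with
  | zero => omega
  | succ fuel ih =>
    cases l with
    | nil => simp [PySem.Chars.splitOn.go, splitNL]
    | cons c rest =>
      by_cases hc : c = '\n'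
      · subst hc
        have hpre : List.isPrefixOf ['\n'] ('\n' :: rest) = true := by simp [List.isPrefixOf]
        simp only [PySem.Chars.splitOn.go, hpre, if_true, List.length, List.drop_succ_cons,
          List.drop_zero]
        rw [ih rest [] (cur.reverse :: acc) (by simpa using Nat.lt_of_succ_lt_succ hf)]
        cases h : splitNL rest with
        | nil => exact absurd h (splitNL_ne_nil rest)
        | cons a t => simp [splitNL, h]
      · have hpre : List.isPrefixOf ['\n'] (c :: rest) = false := by
          simp [List.isPrefixOf, Ne.symm hc]
        simp only [PySem.Chars.splitOn.go, hpre, Bool.false_eq_true, if_false]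
        rw [ih rest (c :: cur) acc (by simpa using Nat.lt_of_succ_lt_succ hf)]
        simp only [splitNL, if_neg hc]
        cases h : splitNL rest with
        | nil => exact absurd h (splitNL_ne_nil rest)
        | cons a t => simp

theorem splitOn_eq (s : List Char) : PySem.Chars.splitOn s ['\n'] = splitNL s := by
  unfold PySem.Chars.splitOn
  rw [splitOn_go_eq (s.length + 1) s [] [] (Nat.lt_succ_self _)]
  cases h : splitNL s with
  | nil => exact absurd h (splitNL_ne_nil s)
  | cons a t => simp

theorem count_go_eq (fuel : Nat) (l : List Char) (acc : Nat) (hf : l.length ≤ fuel) :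
    PySem.Chars.count.go ['\n'] fuel l acc = acc + l.count '\n' := by
  induction fuel generalizing l acc with
  | zero =>
    have : l = [] := List.length_eq_zero_iff.mp (Nat.le_zero.mp hf)
    subst this
    simp [PySem.Chars.count.go]
  | succ fuel ih =>
    cases l with
    | nil => simp [PySem.Chars.count.go]
    | cons c rest =>
      by_cases hc : c = '\n'
      · subst hc
        have hpre : List.isPrefixOf ['\n'] ('\n' :: rest) = true := by simp [List.isPrefixOf]
        simp only [PySem.Chars.count.go, hpre, if_true, List.length, List.drop_succ_cons,
          List.drop_zero]
        rw [ih rest (acc + 1) (by simpa using Nat.le_of_succ_le_succ hf)]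
        simp
        omega
      · have hpre : List.isPrefixOf ['\n'] (c :: rest) = false := by
          simp [List.isPrefixOf, Ne.symm hc]
        simp only [PySem.Chars.count.go, hpre, Bool.false_eq_true, if_false]
        rw [ih rest acc (by simpa using Nat.le_of_succ_le_succ hf)]
        simp [hc]

theorem countNL (l : List Char) : PySem.Chars.count l ['\n'] = l.count '\n' := by
  unfold PySem.Chars.count
  simp only [List.isEmpty_cons, Bool.false_eq_true, if_false]
  simpa using count_go_eq l.length l 0 (Nat.le_refl _)

theorem find_eq_of_minimal (s w : List Char) (p : Nat) (h1 : w <+: s.drop p)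
    (h2 : ∀ i < p, ¬ w <+: s.drop i) : PySem.Chars.find s w = (p : Int) := by
  have h0 : 0 ≤ PySem.Chars.find s w :=
    (PySem.Chars.find_nonneg_iff s w).2 (infix_of_prefix_drop w s p h1)
  obtain ⟨hp, hmin⟩ := PySem.Chars.find_spec h0
  rcases Nat.lt_trichotomy (PySem.Chars.find s w).toNat p with h | h | h
  · exact absurd hp (h2 _ h)
  · omega
  · exact absurd h1 (hmin p h)

theorem find_eq_neg_one_of (s w : List Char) (h : ∀ i, ¬ w <+: s.drop i) :
    PySem.Chars.find s w = -1 := by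
  refine (PySem.Chars.find_eq_neg_one_iff s w).2 (fun hinf => ?_)
  have h0 : 0 ≤ PySem.Chars.find s w := (PySem.Chars.find_nonneg_iff s w).2 hinf
  exact h _ (PySem.Chars.find_spec h0).1

theorem prefix_in_first (a r w : List Char) (hw : '\n' ∉ w) (i : Nat) (hi : i ≤ a.length)
    (h : w <+: (a ++ '\n' :: r).drop i) : w <+: a.drop i := by
  rw [List.drop_append_of_le_length hi] at h
  by_cases hlen : w.length ≤ a.length - i
  · exact (List.isPrefix_append_of_length (by simpa using hlen)).mp h
  · exfalso
    have hj : a.length - i < w.length := by omega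
    have hjlt : a.length - i < (a.drop i ++ '\n' :: r).length := by
      simp [List.length_append, List.length_drop]
    have hget := List.IsPrefix.getElem h hj
    have hmem : w[a.length - i] ∈ w := List.getElem_mem hj
    rw [hget] at hmem
    rw [List.getElem_append_right (by simp [List.length_drop])] at hmem
    simp only [List.length_drop, Nat.sub_self] at hmem
    simp at hmem
    exact hw hmem

theorem findAC_none (w : List Char) (hs : '\n' ∈ w) (ls : List (List Char))
    (h : ∀ l ∈ ls, '\n' ∉ l) : findAC w ls = none := by
  match ls with
  | [] => rfl
  | [a] => rfl
  | a :: b :: rest =>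
    have hia : PySem.Chars.isIn w a = false := by
      rcases hia : PySem.Chars.isIn w a with _ | _
      · rfl
      · exact absurd (((PySem.Chars.isIn_iff_infix w a).1 hia).mem hs) (h a (by simp))
    simp only [findAC, hia, Bool.false_eq_true, if_false]
    exact findAC_none w hs (b :: rest) (fun l hl => h l (by simp [List.mem_cons.1 hl]))

theorem isIn_nl (w : List Char) : PySem.Chars.isIn ['\n'] w = true ↔ '\n' ∈ w := by
  rw [PySem.Chars.isIn_iff_infix]
  exact List.singleton_infix_iff '\n' w

theorem keyChars_single (t w : List Char) (h : '\n' ∉ t) : findAC w (splitNL t) = bOptC t w := by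
  rw [splitNL_no_nl t h]
  have hL : findAC w [t] = none := rfl
  rw [hL]
  unfold bOptC
  rw [splitNL_no_nl t h]
  split
  · rfl
  · split
    · rfl
    · rw [if_neg (by simp only [List.length_singleton]; push_cast; omega)]

theorem drop_past (a r : List Char) (i : Nat) (hi : a.length < i) :
    (a ++ '\n' :: r).drop i = r.drop (i - a.length - 1) := by
  have h2 := List.drop_length_add_append (l₁ := a) (l₂ := '\n' :: r) (i - a.length)
  rw [show a.length + (i - a.length) = i from by omega] at h2
  rw [h2, show i - a.length = (i - a.length - 1) + 1 from by omega, List.drop_succ_cons,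
    Nat.add_sub_cancel]

theorem keyChars_aux : ∀ (n : Nat) (t w : List Char), t.length ≤ n → findAC w (splitNL t) = bOptC t w := by
  intro n
  induction n with
  | zero =>
    intro t w ht
    have h0 : t = [] := List.length_eq_zero_iff.mp (Nat.le_zero.mp ht)
    subst h0
    exact keyChars_single [] w (by simp)
  | succ n ih =>
    intro t w ht
    by_cases hnlt : '\n' ∈ t
    · -- decompose t = a ++ '\n' :: r with '\n' ∉ a
      set p : Char → Bool := fun c => c != '\n' with hp
      have hdrop_ne : t.dropWhile p ≠ [] := by
        intro h0
        have hall := List.dropWhile_eq_nil_iff.mp h0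
        have := hall '\n' hnlt
        simp [hp] at this
      obtain ⟨c, r, hcr⟩ : ∃ c r, t.dropWhile p = c :: r := by
        cases h : t.dropWhile p with
        | nil => exact absurd h hdrop_ne
        | cons c r => exact ⟨c, r, rfl⟩
      have hc : c = '\n' := by
        have hhead := List.head_dropWhile_not p (show t.dropWhile p ≠ [] from hdrop_ne)
        have hch : (t.dropWhile p).head hdrop_ne = c := by simp [hcr]
        rw [hch] at hhead
        simpa [hp] using hhead
      subst hc
      set a := t.takeWhile p with hadef
      have hteq : t = a ++ '\n' :: r := by
        conv_lhs => rw [← List.takeWhile_append_dropWhile (p := p) (l := t)]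
        rw [hcr]
      have ha : '\n' ∉ a := by
        intro hm
        have := List.mem_takeWhile_imp hm
        simp [hp] at this
      have hrlen : r.length ≤ n := by
        have : t.length = a.length + 1 + r.length := by
          rw [hteq]; simp only [List.length_append, List.length_cons]; omega
        omega
      have ihr := ih r w hrlen
      have hnenil := splitNL_ne_nil r
      obtain ⟨b, rest, hsr⟩ : ∃ b rest, splitNL r = b :: rest := by
        cases h : splitNL r with
        | nil => exact absurd h hnenil
        | cons b rest => exact ⟨b, rest, rfl⟩
      rw [hteq, splitNL_append a r ha]
      by_cases hmemw : '\n' ∈ w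
      · -- feature spans lines: both sides none
        have hLnone : findAC w (a :: splitNL r) = none := by
          refine findAC_none w hmemw _ ?_
          intro l hl
          rcases List.mem_cons.1 hl with h | h
          · subst h; exact ha
          · exact splitNL_mem_no_nl r l h
        rw [hLnone]
        unfold bOptC
        rw [if_pos ((isIn_nl w).2 hmemw)]
      · have hnw : '\n' ∉ w := hmemw
        have hw' : PySem.Chars.isIn ['\n'] w = false := by
          rcases h : PySem.Chars.isIn ['\n'] w with _ | _
          · rfl
          · exact absurd ((isIn_nl w).1 h) hnw
        by_cases hia : PySem.Chars.isIn w a = true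
        · -- w occurs in the first line a
          have hqinf : w <:+: a := (PySem.Chars.isIn_iff_infix w a).1 hia
          have h0 : 0 ≤ PySem.Chars.find a w := (PySem.Chars.find_nonneg_iff a w).2 hqinf
          obtain ⟨hpa, hmina⟩ := PySem.Chars.find_spec h0
          obtain ⟨q, hfq⟩ : ∃ q : Nat, PySem.Chars.find a w = (q : Int) :=
            ⟨_, (Int.toNat_of_nonneg h0).symm⟩
          rw [hfq] at hpa hmina
          simp only [Int.toNat_natCast] at hpa hmina
          have hqle : q ≤ a.length := by
            have := PySem.Chars.find_le_length a w
            omega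
          have hfind : PySem.Chars.find (a ++ '\n' :: r) w = (q : Int) := by
            apply find_eq_of_minimal
            · rw [List.drop_append_of_le_length hqle]
              exact hpa.trans (List.prefix_append _ _)
            · intro i hi hcontra
              exact hmina i hi (prefix_in_first a r w hnw i (le_trans (Nat.le_of_lt hi) hqle) hcontra)
          have hcount : (((a ++ '\n' :: r)).take q).count '\n' = 0 := by
            rw [List.take_append_of_le_length hqle]
            exact List.count_eq_zero.2 (fun hmem => ha (List.mem_of_mem_take hmem))
          have hLval : findAC w (a :: splitNL r) = some (PySem.Chars.strip b) := by
            rw [hsr]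
            simp [findAC, hia]
          rw [hLval]
          unfold bOptC
          rw [splitNL_append a r ha]
          simp only [hw', Bool.false_eq_true, if_false]
          rw [hfind, if_neg (by omega)]
          simp only [Int.toNat_natCast]
          rw [hcount]
          rw [if_pos (by rw [hsr]; simp only [List.length_cons]; push_cast; omega)]
          rw [hsr]
          rfl
        · -- w not in the first line
          have hnia : PySem.Chars.isIn w a = false := by
            rcases h : PySem.Chars.isIn w a with _ | _
            · rfl
            · exact absurd h hia
          have hainf : ¬ w <:+: a := (PySem.Chars.isIn_eq_false_iff w a).1 hnia
          have hnopre : ∀ i ≤ a.length, ¬ w <+: (a ++ '\n' :: r).drop i := by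
            intro i hi hc
            exact hainf (infix_of_prefix_drop w a i (prefix_in_first a r w hnw i hi hc))
          have hLrec : findAC w (a :: splitNL r) = findAC w (splitNL r) := by
            rw [hsr]
            simp [findAC, hnia]
          rw [hLrec, ihr]
          by_cases hfr : PySem.Chars.find r w < 0
          · have hfr' : PySem.Chars.find r w = -1 := by
              have := PySem.Chars.neg_one_le_find r w
              omega
            have hnor : ∀ j, ¬ w <+: r.drop j := by
              intro j hc
              exact ((PySem.Chars.find_eq_neg_one_iff r w).1 hfr') (infix_of_prefix_drop w r j hc)
            have hfs : PySem.Chars.find (a ++ '\n' :: r) w = -1 := by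
              apply find_eq_neg_one_of
              intro i hc
              by_cases hi : i ≤ a.length
              · exact hnopre i hi hc
              · rw [drop_past a r i (by omega)] at hc
                exact hnor _ hc
            unfold bOptC
            simp only [hw', Bool.false_eq_true, if_false]
            rw [hfr', hfs]
            simp
          · have h0r : 0 ≤ PySem.Chars.find r w := by omega
            obtain ⟨hpr, hminr⟩ := PySem.Chars.find_spec h0r
            obtain ⟨qr, hfreq⟩ : ∃ qr : Nat, PySem.Chars.find r w = (qr : Int) :=
              ⟨_, (Int.toNat_of_nonneg h0r).symm⟩
            rw [hfreq] at hpr hminr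
            simp only [Int.toNat_natCast] at hpr hminr
            have hfs : PySem.Chars.find (a ++ '\n' :: r) w = ((a.length + 1 + qr : Nat) : Int) := by
              apply find_eq_of_minimal
              · rw [drop_past a r _ (by omega)]
                rw [show a.length + 1 + qr - a.length - 1 = qr from by omega]
                exact hpr
              · intro i hi hc
                by_cases hia' : i ≤ a.length
                · exact hnopre i hia' hc
                · rw [drop_past a r i (by omega)] at hc
                  exact hminr _ (by omega) hc
            have htake : (a ++ '\n' :: r).take (a.length + 1 + qr) = a ++ '\n' :: r.take qr := by
              have h2 := List.take_length_add_append (l₁ := a) (l₂ := '\n' :: r) (qr + 1)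
              rw [show a.length + (qr + 1) = a.length + 1 + qr from by omega] at h2
              rw [h2, List.take_succ_cons]
            have hcount : ((a ++ '\n' :: r).take (a.length + 1 + qr)).count '\n' =
                (r.take qr).count '\n' + 1 := by
              rw [htake, List.count_append, List.count_eq_zero.2 ha, List.count_cons_self]
              omega
            unfold bOptC
            rw [splitNL_append a r ha]
            simp only [hw', Bool.false_eq_true, if_false]
            rw [hfreq, hfs]
            rw [if_neg (show ¬ ((qr : Nat) : Int) < 0 from by omega),
               if_neg (show ¬ ((a.length + 1 + qr : Nat) : Int) < 0 from by omega)]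
            simp only [Int.toNat_natCast]
            rw [hcount]
            simp only [List.length_cons]
            by_cases hcond : ((r.take qr).count '\n' : Int) < ((splitNL r).length : Int) - 1
            · rw [if_pos (show ((List.count '\n' (List.take qr r) : Nat) : Int) < ((splitNL r).length : Int) - 1 from by simpa using hcond),
                 if_pos (show ((List.count '\n' (List.take qr r) + 1 : Nat) : Int) < (((splitNL r).length + 1 : Nat) : Int) - 1 from by push_cast; omega)]
              rw [List.getD_cons_succ]
            · rw [if_neg (show ¬ ((List.count '\n' (List.take qr r) : Nat) : Int) < ((splitNL r).length : Int) - 1 from by simpa using hcond),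
                 if_neg (show ¬ ((List.count '\n' (List.take qr r) + 1 : Nat) : Int) < (((splitNL r).length + 1 : Nat) : Int) - 1 from by push_cast; omega)]
    · exact keyChars_single t w hnlt

theorem keyChars (t w : List Char) : findAC w (splitNL t) = bOptC t w :=
  keyChars_aux t.length t w (Nat.le_refl _)

theorem strip_ofList (b : String) : String.ofList (PySem.Chars.strip b.toList) = PySem.Str.strip b := by
  rw [← PySem.Str.toList_strip, String.ofList_toList]

theorem liftA (w : String) (L : List String) :
    fhfFindA w L = (findAC w.toList (L.map String.toList)).map String.ofList := by
  induction L with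
  | nil => rfl
  | cons a L' ih =>
    cases L' with
    | nil => rfl
    | cons b rest =>
      simp only [fhfFindA, findAC, List.map_cons, PySem.Str.isIn_eq]
      by_cases h : PySem.Chars.isIn w.toList a.toList = true
      · simp [h, strip_ofList]
      · simp only [h, Bool.false_eq_true, if_false]
        exact ih

theorem split_bridge (s : String) :
    PySem.Str.split? s "\n" = some ((splitNL s.toList).map String.ofList) := by
  have h1 := PySem.Str.split?_map s "\n"
  rw [show ("\n" : String).toList = ['\n'] from rfl] at h1
  simp only [PySem.Chars.split?, List.isEmpty_cons, Bool.false_eq_true, if_false] at h1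
  rw [splitOn_eq] at h1
  cases h : PySem.Str.split? s "\n" with
  | none => rw [h] at h1; simp at h1
  | some L =>
    rw [h] at h1
    simp only [Option.map_some, Option.some_inj] at h1
    rw [← h1, List.map_map]
    simp [Function.comp_def, String.ofList_toList]

-- ===== VERDICT (by name: the statement is the Claim_ definition above) =====
theorem format_house_feature_spec : Claim_equal_format_house_feature := by
  intro input_string features _
  show format_house_feature input_string features = format_house_feature_alt input_string features
  simp only [format_house_feature, format_house_feature_alt, split_bridge, Option.getD_some]
  by_cases hlen : ((splitNL (PySem.Str.strip input_string).toList).map String.ofList).length < 2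
  · rw [if_pos hlen]
    have hnone : ∀ w : String,
        fhfFindA w ((splitNL (PySem.Str.strip input_string).toList).map String.ofList) = none := by
      intro w
      match hL : (splitNL (PySem.Str.strip input_string).toList).map String.ofList, hlen with
      | [], _ => rfl
      | [a], _ => rfl
      | a :: b :: r, h => simp at h
    rw [PySem.List.foldl_congr_mem features _ (fun d _ => d) PySem.Dict.empty
      (fun d w _ => by rw [hnone w])]
    rw [PySem.List.foldl_ignore]
    rfl
  · rw [if_neg hlen]
    refine congrArg PySem.Dict.items ?_
    refine PySem.List.foldl_congr_mem features _ _ _ ?_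
    intro d w hw
    rw [liftA w ((splitNL (PySem.Str.strip input_string).toList).map String.ofList)]
    rw [List.map_map, show (String.toList ∘ String.ofList) = id from funext (fun l => String.toList_ofList),
      List.map_id, keyChars]
    set t := (PySem.Str.strip input_string).toList with hts
    have hb1 : PySem.Str.isIn "\n" w = PySem.Chars.isIn ['\n'] w.toList := PySem.Str.isIn_eq _ _
    have hb2 : PySem.Str.find (PySem.Str.strip input_string) w = PySem.Chars.find t w.toList :=
      PySem.Str.find_eq _ w
    by_cases h1 : PySem.Chars.isIn ['\n'] w.toList = true
    · rw [if_pos (show PySem.Str.isIn "\n" w = true from by rw [hb1]; exact h1)]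
      unfold bOptC
      rw [if_pos h1]
      rfl
    · rw [if_neg (show ¬ PySem.Str.isIn "\n" w = true from by rw [hb1]; exact h1)]
      by_cases h2 : PySem.Chars.find t w.toList < 0
      · rw [if_pos (show PySem.Str.find (PySem.Str.strip input_string) w < 0 from by rw [hb2]; exact h2)]
        unfold bOptC
        rw [if_neg h1, if_pos h2]
        rfl
      · rw [if_neg (show ¬ PySem.Str.find (PySem.Str.strip input_string) w < 0 from by rw [hb2]; exact h2)]
        have h2' : 0 ≤ PySem.Chars.find t w.toList := by omega
        have hb3 : PySem.Str.count
              (PySem.Str.slice (PySem.Str.strip input_string) none (some (PySem.Str.find (PySem.Str.strip input_string) w))) "\n"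
            = (t.take (PySem.Chars.find t w.toList).toNat).count '\n' := by
          rw [PySem.Str.count_eq, PySem.Str.toList_slice, hb2]
          rw [show PySem.Chars.find t w.toList = (((PySem.Chars.find t w.toList).toNat : Nat) : Int) from
            (Int.toNat_of_nonneg h2').symm]
          simp only [show ∀ (xs : List Char) (a b : Option Int), PySem.Chars.slice xs a b = PySem.List.slice xs a b from fun _ _ _ => rfl]
          rw [← hts]
          rw [PySem.List.slice_to_natCast]
          rw [show ("\n" : String).toList = ['\n'] from rfl, countNL]
          simp only [Int.toNat_natCast]
        rw [hb3]
        unfold bOptC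
        rw [if_neg h1, if_neg (show ¬ PySem.Chars.find t w.toList < 0 from h2)]
        set iN := (t.take (PySem.Chars.find t w.toList).toNat).count '\n' with hiN
        rw [List.length_map]
        by_cases h3 : ((iN : Nat) : Int) < ((splitNL t).length : Int) - 1
        · rw [if_pos h3, if_pos h3]
          have hidx : iN + 1 < (splitNL t).length := by omega
          rw [show ((iN : Nat) : Int) + 1 = ((iN + 1 : Nat) : Int) from by push_cast; ring]
          rw [PySem.List.pyGet?_natCast]
          rw [List.getElem?_eq_getElem (by rw [List.length_map]; exact hidx)]
          simp only [Option.getD_some]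
          rw [List.getElem_map]
          rw [show PySem.Str.strip (String.ofList (splitNL t)[iN + 1]) =
                String.ofList (PySem.Chars.strip (splitNL t)[iN + 1]) from by
              rw [← strip_ofList, String.toList_ofList]]
          rw [List.getD_eq_getElem (splitNL t) [] hidx]
          rfl
        · rw [if_neg h3, if_neg h3]
          rfl
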